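-- pv_equiv track=rewrite | github.com/singebogo/LogfileAnalysis | log_analyzer/utils/combines.py | down_sample_data
-- ===== SOURCE A (Python) =====
-- def down_sample_data(data, max_points=500):
--     """减少数据点数量"""
--     if len(data) <= max_points:
--         return data
--
--     step = len(data) // max_points
--     keys = list(data.keys())
--     values = list(data.values())
--
--     return {
--         keys[i]: sum(values[i:i + step]) for i in range(0, len(keys), step)
--     }
-- ===== SOURCE B (Python) =====
-- def down_sample_data(data, max_points=500):
--     """Streaming single-pass downsample: one accumulator per window instead of per-window slicing."""
--     if len(data) <= max_points:
--         return data
--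
--     step = len(data) // max_points
--     n = len(data)
--     result = {}
--     acc = 0
--     current_key = None
--     for i, (k, v) in enumerate(data.items()):
--         if i % step == 0:
--             current_key = k
--             acc = 0
--         acc += v
--         if i % step == step - 1 or i == n - 1:
--             result[current_key] = acc
--     return result
-- ===== Notes on version B (the rewrite author's own statement) =====
-- stated objective: alternative
-- what changed: B replaces the window-indexed dict comprehension (stride over range with per-window slicing and sum()) by a single streaming enumerate pass that keeps one running accumulator and the current window key, storing the accumulator when the window closes.
-- outside the precondition, e.g. on down_sample_data({'a': 1, 'b': 2}, -1): A returns {}, B returns {'a': 3}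
import Mathlib
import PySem

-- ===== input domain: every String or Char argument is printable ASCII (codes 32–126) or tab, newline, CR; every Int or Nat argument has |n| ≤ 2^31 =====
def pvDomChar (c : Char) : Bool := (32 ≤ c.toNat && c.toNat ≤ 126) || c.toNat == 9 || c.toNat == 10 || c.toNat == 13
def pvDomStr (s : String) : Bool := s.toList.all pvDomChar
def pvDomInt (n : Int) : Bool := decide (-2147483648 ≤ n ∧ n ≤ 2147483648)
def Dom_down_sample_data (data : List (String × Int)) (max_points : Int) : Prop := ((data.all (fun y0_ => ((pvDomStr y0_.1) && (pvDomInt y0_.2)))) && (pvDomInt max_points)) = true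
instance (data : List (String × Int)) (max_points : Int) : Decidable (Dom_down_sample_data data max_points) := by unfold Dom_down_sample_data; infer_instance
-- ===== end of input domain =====

-- B replaces A's window-indexed dict comprehension (stride range + per-window slicing/sum)
-- by a single streaming enumerate pass with one running accumulator per window (alternative
-- decomposition, same asymptotic cost).

-- ===== PORT A =====
def down_sample_data (data : List (String × Int)) (max_points : Int) : List (String × Int) :=
  if (data.length : Int) ≤ max_points then data
  else
    let step : Int := PySem.Int.floordiv (data.length : Int) max_points
    let keys : List String := data.map Prod.fst
    let values : List Int := data.map Prod.snd
    -- dict comprehension over range(0, len(keys), step); keys[i] is always in bounds there,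
    -- so pyGetD's default "" is unreachable
    ((PySem.List.pyRange 0 (keys.length : Int) step).foldl
      (fun (d : PySem.Dict String Int) i =>
        d.insert (PySem.List.pyGetD keys i "")
          ((PySem.List.slice values (some i) (some (i + step))).sum))
      PySem.Dict.empty).items

-- ===== PORT B =====
def down_sample_data_alt (data : List (String × Int)) (max_points : Int) : List (String × Int) :=
  if (data.length : Int) ≤ max_points then data
  else
    let step : Int := PySem.Int.floordiv (data.length : Int) max_points
    let n : Int := (data.length : Int)
    -- current_key starts as None in Source B; it is always set before use (i % step == 0 fires at
    -- i = 0 for any positive step), so "" here is an unreachable placeholder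
    (((PySem.List.enumerate data).foldl
      (fun (st : PySem.Dict String Int × Int × String) p =>
        let acc := if PySem.Int.mod p.1 step = 0 then 0 else st.2.1
        let ck := if PySem.Int.mod p.1 step = 0 then p.2.1 else st.2.2
        let acc := acc + p.2.2
        if PySem.Int.mod p.1 step = step - 1 ∨ p.1 = n - 1 then (st.1.insert ck acc, acc, ck)
        else (st.1, acc, ck))
      (PySem.Dict.empty, 0, ""))).1.items

-- ===== PRECONDITION & SPEC =====
-- Pre_ excludes non-positive max_points, which is outside downsampling's natural domain: there A
-- raises ZeroDivisionError (max_points = 0, nonempty data) or ValueError (range step 0), and for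
-- negative max_points its negative-step range is accidentally empty so A returns {}, discarding
-- all data; only the empty-input-with-zero corner, where both trivially return the input, is kept.
def Pre_down_sample_data (data : List (String × Int)) (max_points : Int) : Prop :=
  1 ≤ max_points ∨ (data = [] ∧ max_points = 0)
instance (data : List (String × Int)) (max_points : Int) : Decidable (Pre_down_sample_data data max_points) := by unfold Pre_down_sample_data; infer_instance

def pvWitness_down_sample_data : (List (String × Int)) × Int := ([("a", 1), ("b", 2), ("c", 3)], 1)

def Spec_down_sample_data (data : List (String × Int)) (max_points : Int) (out : List (String × Int)) : Prop := out = down_sample_data_alt data max_points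
instance (data : List (String × Int)) (max_points : Int) (out : List (String × Int)) : Decidable (Spec_down_sample_data data max_points out) := by unfold Spec_down_sample_data; infer_instance

-- ===== CLAIM (what is proved, stated in full; the proofs are below) =====
def Claim_equal_down_sample_data : Prop := ∀ (data : List (String × Int)) (max_points : Int), Dom_down_sample_data data max_points → Pre_down_sample_data data max_points → Spec_down_sample_data data max_points (down_sample_data data max_points)

-- ===== LEMMAS AND PROOFS =====

-- B's loop body, as a named function (definitionally equal to the lambda in port B)
def pvStep (step n : Int) (st : PySem.Dict String Int × Int × String) (p : Int × (String × Int)) :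
    PySem.Dict String Int × Int × String :=
  let acc := if PySem.Int.mod p.1 step = 0 then 0 else st.2.1
  let ck := if PySem.Int.mod p.1 step = 0 then p.2.1 else st.2.2
  let acc := acc + p.2.2
  if PySem.Int.mod p.1 step = step - 1 ∨ p.1 = n - 1 then (st.1.insert ck acc, acc, ck)
  else (st.1, acc, ck)

def pvIns (d : PySem.Dict String Int) (p : String × Int) : PySem.Dict String Int := d.insert p.1 p.2

-- the list of (window head key, window sum) pairs both programs insert, in order
def pvWindows (s : Nat) : List (String × Int) → List (String × Int)
  | [] => []
  | x :: xs => (x.1, x.2 + ((xs.take (s - 1)).map Prod.snd).sum) :: pvWindows s (xs.drop (s - 1))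
termination_by l => l.length
decreasing_by simp only [List.length_drop, List.length_cons]; omega

lemma pvWindows_nil (s : Nat) : pvWindows s [] = [] := by simp [pvWindows]

lemma pvWindows_cons (s : Nat) (x : String × Int) (xs : List (String × Int)) :
    pvWindows s (x :: xs)
      = (x.1, x.2 + ((xs.take (s - 1)).map Prod.snd).sum) :: pvWindows s (xs.drop (s - 1)) := by
  simp only [pvWindows]

lemma pv_nil (s m : Int) (hs : 0 < s) (hm : m ≤ 0) : PySem.List.pyRange 0 m s = [] := by
  rw [PySem.List.pyRange_of_pos _ _ hs, if_neg (by omega)]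
  simp

lemma pv_shift (s n : Int) (hs : 0 < s) (hn : 0 < n) :
    PySem.List.pyRange 0 n s = 0 :: (PySem.List.pyRange 0 (n - s) s).map (· + s) := by
  rw [PySem.List.pyRange_of_pos _ _ hs, PySem.List.pyRange_of_pos _ _ hs]
  have h0 : (0:Int) ≤ (n - 1) / s := Int.ediv_nonneg (by omega) (by omega)
  have h1 : (n - 0 + s - 1) / s = (n - 1) / s + 1 := by
    have h := Int.add_mul_ediv_right (n - 1) 1 (show s ≠ 0 by omega)
    have h2 : n - 0 + s - 1 = n - 1 + 1 * s := by ring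
    rw [h2, h]
  have hcnt : (if 0 < n - s then ((n - s - 0 + s - 1) / s).toNat else 0) = ((n - 1) / s).toNat := by
    by_cases hns : 0 < n - s
    · rw [if_pos hns]; congr 2; ring
    · rw [if_neg hns]
      have : (n - 1) / s = 0 := Int.ediv_eq_zero_of_lt (by omega) (by omega)
      omega
  rw [if_pos hn, hcnt, h1, show ((n - 1) / s + 1).toNat = ((n - 1) / s).toNat + 1 by omega,
      List.range_succ_eq_map]
  simp only [List.map_cons, List.map_map]
  congr 1
  · simp
  · apply List.map_congr_left
    intro k _
    simp only [Function.comp]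
    push_cast
    ring

lemma pv_LA (s : Nat) (hs : 1 ≤ s) (l : List (String × Int)) :
    (PySem.List.pyRange 0 (l.length : Int) (s : Int)).map
      (fun i => (PySem.List.pyGetD (l.map Prod.fst) i "",
                 (PySem.List.slice (l.map Prod.snd) (some i) (some (i + (s : Int)))).sum))
    = pvWindows s l := by
  match l with
  | [] =>
    rw [show (([] : List (String × Int)).length : Int) = 0 by simp,
        pv_nil _ _ (by exact_mod_cast hs) le_rfl, pvWindows_nil]
    rfl
  | x :: xs =>
    have hspos : (0:Int) < (s : Int) := by exact_mod_cast hs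
    have hn : (0:Int) < ((x :: xs).length : Int) := by simp
    rw [pv_shift _ _ hspos hn, pvWindows_cons]
    simp only [List.map_cons, List.map_map]
    refine List.cons_eq_cons.mpr ⟨?_, ?_⟩
    · -- head: the window starting at index 0
      dsimp only
      refine Prod.ext ?_ ?_
      · simp [PySem.List.pyGetD_zero_cons]
      · show (PySem.List.slice ((x :: xs).map Prod.snd) (some 0) (some (0 + (s:Int)))).sum
            = x.2 + ((xs.take (s - 1)).map Prod.snd).sum
        rw [zero_add, PySem.List.slice_zero_start, PySem.List.slice_to_natCast]
        rw [show s = (s - 1) + 1 by omega]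
        simp only [List.map_cons, List.take_succ_cons, List.sum_cons,
          show s - 1 + 1 - 1 = s - 1 by omega, List.map_take]
    · -- tail: shift by s and recurse
      by_cases hns : ((x :: xs).length : Int) - (s : Int) ≤ 0
      · rw [pv_nil _ _ hspos hns]
        have hxs : xs.drop (s - 1) = [] := by
          apply List.drop_eq_nil_of_le
          simp at hns ⊢; omega
        rw [hxs, pvWindows_nil]
        simp
      · have hlen : s ≤ xs.length := by simp at hns; omega
        have hr : ((xs.drop (s - 1)).length : Int) = ((x :: xs).length : Int) - (s : Int) := by
          simp [List.length_drop]; omega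
        rw [← hr, ← pv_LA s hs (xs.drop (s - 1))]
        apply List.map_congr_left
        intro i hi
        obtain ⟨hi0, hilt, -⟩ := (PySem.List.mem_pyRange_iff_of_pos hspos i).1 hi
        obtain ⟨j, rfl⟩ : ∃ j : Nat, i = (j : Int) := ⟨i.toNat, by omega⟩
        have hfst : (xs.drop (s - 1)).map Prod.fst = ((x :: xs).map Prod.fst).drop s := by
          rw [show s = (s - 1) + 1 by omega]
          simp [List.map_drop]
        have hsnd : (xs.drop (s - 1)).map Prod.snd = ((x :: xs).map Prod.snd).drop s := by
          rw [show s = (s - 1) + 1 by omega]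
          simp [List.map_drop]
        dsimp only [Function.comp]
        refine Prod.ext ?_ ?_
        · -- keys
          show PySem.List.pyGetD ((x :: xs).map Prod.fst) ((j:Int) + (s:Int)) ""
              = PySem.List.pyGetD ((xs.drop (s - 1)).map Prod.fst) (j:Int) ""
          rw [hfst, show ((j : Int) + (s : Int)) = ((j + s : Nat) : Int) by push_cast; ring,
              PySem.List.pyGetD_natCast, PySem.List.pyGetD_natCast]
          simp only [List.getD_eq_getElem?_getD, List.getElem?_drop]
          rw [Nat.add_comm s j]
        · -- window sums
          show (PySem.List.slice ((x :: xs).map Prod.snd)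
                  (some ((j:Int) + (s:Int))) (some ((j:Int) + (s:Int) + (s:Int)))).sum
              = (PySem.List.slice ((xs.drop (s - 1)).map Prod.snd)
                  (some (j:Int)) (some ((j:Int) + (s:Int)))).sum
          rw [hsnd]
          conv_rhs => rw [PySem.List.slice_natCast_add]
          rw [show ((j : Int) + (s : Int)) = ((j + s : Nat) : Int) by push_cast; ring,
              PySem.List.slice_natCast_add, List.drop_drop, Nat.add_comm s j]
termination_by l.length
decreasing_by simp only [List.length_drop, List.length_cons]; omega

-- zeta-reduced form of B's loop body (definitional)
lemma pvStep_def (step n : Int) (d : PySem.Dict String Int) (acc : Int) (ck : String)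
    (i : Int) (y : String × Int) :
    pvStep step n (d, acc, ck) (i, y)
      = if PySem.Int.mod i step = step - 1 ∨ i = n - 1
        then (d.insert (if PySem.Int.mod i step = 0 then y.1 else ck)
                ((if PySem.Int.mod i step = 0 then 0 else acc) + y.2),
              (if PySem.Int.mod i step = 0 then 0 else acc) + y.2,
              if PySem.Int.mod i step = 0 then y.1 else ck)
        else (d, (if PySem.Int.mod i step = 0 then 0 else acc) + y.2,
              if PySem.Int.mod i step = 0 then y.1 else ck) := rfl

-- mod arithmetic for an in-window offset
lemma pv_mod (s b r : Int) (hsb : s ∣ b) (h0 : 0 ≤ r) (hr : r < s) (hs : 0 < s) :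
    PySem.Int.mod (b + r) s = r := by
  rw [PySem.Int.mod_eq_emod_of_pos hs]
  obtain ⟨q, rfl⟩ := hsb
  rw [show s * q + r = r + s * q by ring, Int.add_mul_emod_self_left]
  exact Int.emod_eq_of_lt h0 hr

-- folding B's step over one window tail (no reset inside; closes exactly at the last element)
lemma pv_CF (s : Nat) (n : Int) (hs : 1 ≤ s) (c : List (String × Int)) :
    ∀ (b r : Nat) (d : PySem.Dict String Int) (acc : Int) (ck : String),
      c ≠ [] → 1 ≤ r → r + c.length ≤ s → ((s : Int)) ∣ ((b : Int)) →
      ((b : Int) + (r : Int) + (c.length : Int)) ≤ n →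
      (r + c.length = s ∨ (b : Int) + (r : Int) + (c.length : Int) = n) →
      (PySem.List.enumerate c ((b : Int) + (r : Int))).foldl (pvStep (s : Int) n) (d, acc, ck)
        = (d.insert ck (acc + (c.map Prod.snd).sum), acc + (c.map Prod.snd).sum, ck) := by
  match c with
  | [] => intro b r d acc ck hne; exact absurd rfl hne
  | [y] =>
    intro b r d acc ck _ hr1 hrs hdvd hle hclose
    have hspos : (0:Int) < (s:Int) := by exact_mod_cast hs
    simp only [List.length_cons, List.length_nil, zero_add] at hrs hle hclose
    have hmod : PySem.Int.mod ((b : Int) + (r : Int)) (s : Int) = (r : Int) :=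
      pv_mod _ _ _ hdvd (by positivity) (by omega) hspos
    rw [PySem.List.enumerate_cons, PySem.List.enumerate_nil, List.foldl_cons, List.foldl_nil,
        pvStep_def, hmod,
        if_neg (show ¬((r:Int) = 0) by omega),
        if_neg (show ¬((r:Int) = 0) by omega),
        if_pos (show (r:Int) = (s:Int) - 1 ∨ (b:Int) + (r:Int) = n - 1 by
          rcases hclose with h | h
          · left; omega
          · right; omega)]
    simp
  | y :: y' :: c' =>
    intro b r d acc ck _ hr1 hrs hdvd hle hclose
    have hspos : (0:Int) < (s:Int) := by exact_mod_cast hs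
    simp only [List.length_cons] at hrs hle hclose
    have hmod : PySem.Int.mod ((b : Int) + (r : Int)) (s : Int) = (r : Int) :=
      pv_mod _ _ _ hdvd (by positivity) (by omega) hspos
    rw [PySem.List.enumerate_cons, List.foldl_cons, pvStep_def, hmod,
        if_neg (show ¬((r:Int) = 0) by omega),
        if_neg (show ¬((r:Int) = 0) by omega),
        if_neg (show ¬((r:Int) = (s:Int) - 1 ∨ (b:Int) + (r:Int) = n - 1) by
          exact not_or.mpr ⟨by omega, by omega⟩)]
    have hIH := pv_CF s n hs (y' :: c') b (r + 1) d (acc + y.2) ck (by simp)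
      (by omega) (by simp only [List.length_cons]; omega) hdvd
      (by simp only [List.length_cons]; omega)
      (by rcases hclose with h | h
          · left; simp only [List.length_cons]; omega
          · right; simp only [List.length_cons]; omega)
    rw [show (b : Int) + (r : Int) + 1 = (b : Int) + ((r + 1 : Nat) : Int) by push_cast; ring,
        hIH]
    simp only [List.map_cons, List.sum_cons, add_assoc]
termination_by c.length

-- folding B's step over a whole suffix starting at a window boundary
lemma pv_LB (s : Nat) (n : Int) (hs : 1 ≤ s) (l : List (String × Int)) :
    ∀ (b : Nat) (d : PySem.Dict String Int) (acc : Int) (ck : String),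
      ((s : Int)) ∣ ((b : Int)) → ((b : Int) + (l.length : Int) = n) →
      ((PySem.List.enumerate l (b : Int)).foldl (pvStep (s : Int) n) (d, acc, ck)).1
        = (pvWindows s l).foldl pvIns d := by
  match l with
  | [] =>
    intro b d acc ck _ _
    rw [PySem.List.enumerate_nil, List.foldl_nil, pvWindows_nil, List.foldl_nil]
  | x :: xs =>
    intro b d acc ck hdvd hbn
    have hspos : (0:Int) < (s:Int) := by exact_mod_cast hs
    have hmod0 : PySem.Int.mod ((b : Int)) (s : Int) = 0 := by
      have h := pv_mod (s : Int) (b : Int) 0 hdvd le_rfl hspos hspos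
      simpa using h
    simp only [List.length_cons] at hbn
    rw [PySem.List.enumerate_cons, List.foldl_cons, pvWindows_cons, List.foldl_cons]
    have hx : pvStep (s:Int) n (d, acc, ck) ((b:Int), x)
        = if (0:Int) = (s:Int) - 1 ∨ (b:Int) = n - 1
          then (d.insert x.1 x.2, x.2, x.1) else (d, x.2, x.1) := by
      rw [pvStep_def, hmod0]
      norm_num
    rw [hx]
    by_cases hs1 : s = 1
    · -- step 1: every element is its own window
      subst hs1
      rw [if_pos (Or.inl (by norm_num))]
      have hIH := pv_LB 1 n le_rfl xs (b + 1) (d.insert x.1 x.2) x.2 x.1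
        (by simp) (by omega)
      rw [show (b:Int) + 1 = ((b + 1 : Nat) : Int) by push_cast; ring, hIH]
      simp [pvIns]
    · by_cases hlast : (b:Int) = n - 1
      · -- x is the globally last element: the short final window closes at once
        have hxs : xs = [] := by
          have h0 : xs.length = 0 := by omega
          exact List.length_eq_zero_iff.mp h0
        subst hxs
        rw [if_pos (Or.inr hlast), PySem.List.enumerate_nil, List.foldl_nil]
        simp [pvWindows_nil, pvIns]
      · -- a full-or-tail window: fold its tail with pv_CF, then recurse at the next boundary
        rw [if_neg (not_or.mpr ⟨by omega, hlast⟩)]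
        have hxslen : 1 ≤ xs.length := by omega
        set c := xs.take (s - 1) with hc
        have hclen : c.length = min (s - 1) xs.length := by rw [hc]; exact List.length_take
        have hcne : c ≠ [] := List.ne_nil_of_length_pos (by omega)
        conv_lhs => rw [show xs = c ++ xs.drop (s - 1) from (List.take_append_drop _ _).symm]
        rw [PySem.List.enumerate_append, List.foldl_append]
        have hCF := pv_CF s n hs c b 1 d x.2 x.1 hcne le_rfl (by omega) hdvd
          (by omega)
          (by by_cases h : s - 1 ≤ xs.length
              · left; omega
              · right; omega)
        rw [show ((b:Int)) + 1 = (b:Int) + ((1:Nat):Int) by norm_num, hCF]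
        by_cases hrest : xs.length ≤ s - 1
        · have hdrop : xs.drop (s - 1) = [] := List.drop_eq_nil_of_le hrest
          have hcx : c = xs := by rw [hc]; exact List.take_of_length_le hrest
          rw [hdrop, PySem.List.enumerate_nil, List.foldl_nil, pvWindows_nil, List.foldl_nil]
          simp [pvIns, hcx]
        · have hclen' : c.length = s - 1 := by omega
          have hIH := pv_LB s n hs (xs.drop (s - 1)) (b + s)
            (d.insert x.1 (x.2 + (c.map Prod.snd).sum)) (x.2 + (c.map Prod.snd).sum) x.1
            (by push_cast; exact dvd_add hdvd dvd_rfl)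
            (by simp only [List.length_drop]; omega)
          rw [show (b:Int) + ((1:Nat):Int) + ((c.length):Int) = (((b + s):Nat):Int) by
            push_cast; omega, hIH]
          rfl
termination_by l.length
decreasing_by
  all_goals simp only [List.length_drop, List.length_cons]; omega

-- ===== VERDICT (by name: the statement is the Claim_ definition above) =====
theorem down_sample_data_spec : Claim_equal_down_sample_data := by
  intro data max_points _hdom hpre
  unfold Spec_down_sample_data down_sample_data down_sample_data_alt
  by_cases hif : (data.length : Int) ≤ max_points
  · rw [if_pos hif, if_pos hif]
  · rw [if_neg hif, if_neg hif]
    have hmp : 1 ≤ max_points := by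
      rcases hpre with h | ⟨hd, hm⟩
      · exact h
      · subst hd; subst hm; simp at hif
    have hmplt : max_points < (data.length : Int) := by omega
    set step : Int := PySem.Int.floordiv (data.length : Int) max_points with hstepdef
    have hstep1 : 1 ≤ step := by
      rw [hstepdef, PySem.Int.floordiv_eq_ediv_of_pos (by omega)]
      rw [Int.le_ediv_iff_mul_le (by omega)]
      omega
    set s : Nat := step.toNat with hsdef
    have hs1 : 1 ≤ s := by omega
    have hscast : (s : Int) = step := Int.toNat_of_nonneg (by omega)
    have hA : (PySem.List.pyRange 0 ((data.length : Int)) ((s:Int))).foldl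
        (fun (d : PySem.Dict String Int) i =>
          d.insert (PySem.List.pyGetD (data.map Prod.fst) i "")
            ((PySem.List.slice (data.map Prod.snd) (some i) (some (i + (s:Int)))).sum))
        PySem.Dict.empty
        = ((PySem.List.pyRange 0 ((data.length : Int)) ((s:Int))).map
            (fun i => (PySem.List.pyGetD (data.map Prod.fst) i "",
                       (PySem.List.slice (data.map Prod.snd) (some i) (some (i + (s:Int)))).sum))).foldl
            pvIns PySem.Dict.empty := by
      rw [List.foldl_map]
      rfl
    have hB := pv_LB s ((data.length : Int)) hs1 data 0 PySem.Dict.empty 0 ""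
      (by simp) (by simp)
    simp only [Nat.cast_zero] at hB
    show ((PySem.List.pyRange 0 (((data.map Prod.fst).length : Int)) step).foldl
        (fun (d : PySem.Dict String Int) i =>
          d.insert (PySem.List.pyGetD (data.map Prod.fst) i "")
            ((PySem.List.slice (data.map Prod.snd) (some i) (some (i + step))).sum))
        PySem.Dict.empty).items
      = (((PySem.List.enumerate data).foldl (pvStep step ((data.length : Int)))
          (PySem.Dict.empty, 0, "")).1).items
    rw [← hscast]
    simp only [List.length_map]
    rw [hA, pv_LA s hs1 data, hB]
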